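-- pv_equiv track=rewrite | github.com/BDlhj/BaekJoon-Programmers | 프로그래머스/1/64061. 크레인 인형뽑기 게임/크레인 인형뽑기 게임.py | solution
-- ===== SOURCE A (Python) =====
-- def solution(board, moves):
--     board = list(zip(*board))
--     board = [list(line)[::-1] for line in board]
--     for line in board:
--         for j in line[::-1]:
--             if j == 0:
--                 line.pop()
--
--     stack = []
--     ans = 0
--
--     for move in moves:
--         move -= 1
--         if board[move]:
--             if not stack:
--                 stack.append(board[move].pop())
--             else:
--                 if stack[-1] == board[move][-1]:
--                     stack.pop()
--                     board[move].pop()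
--                     ans += 2
--                 else:
--                     stack.append(board[move].pop())
--
--     return ans
-- ===== SOURCE B (Python) =====
-- def solution(board, moves):
--     # B: no transpose/reverse/strip and no mutation of column data: build the
--     # columns once (top first, empty cells kept) and advance a per-column
--     # cursor past empty cells; the basket logic is unchanged.
--     width = min(map(len, board), default=0)
--     cols = [[row[j] for row in board] for j in range(width)]
--     height = len(board)
--     ptr = [0] * width
--     basket = []
--     ans = 0
--     for m in moves:
--         j = m - 1
--         p = ptr[j]
--         col = cols[j]
--         while p < height and col[p] == 0:
--             p += 1
--         if p < height:
--             doll = col[p]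
--             p += 1
--             if basket and basket[-1] == doll:
--                 basket.pop()
--                 ans += 2
--             else:
--                 basket.append(doll)
--         ptr[j] = p
--     return ans
-- ===== Notes on version B (the rewrite author's own statement) =====
-- stated objective: alternative
-- what changed: B drops A's transpose/reverse/zero-stripping preprocessing and destructive column-stack popping: it builds the columns once (top first, empty cells kept) and simulates the moves by advancing a per-column cursor past empty cells, leaving the column data immutable.
-- outside the precondition, e.g. on solution([[1], [0], [1]], [1, 1, 1]): A returns 0, B returns 2
import Mathlib
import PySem

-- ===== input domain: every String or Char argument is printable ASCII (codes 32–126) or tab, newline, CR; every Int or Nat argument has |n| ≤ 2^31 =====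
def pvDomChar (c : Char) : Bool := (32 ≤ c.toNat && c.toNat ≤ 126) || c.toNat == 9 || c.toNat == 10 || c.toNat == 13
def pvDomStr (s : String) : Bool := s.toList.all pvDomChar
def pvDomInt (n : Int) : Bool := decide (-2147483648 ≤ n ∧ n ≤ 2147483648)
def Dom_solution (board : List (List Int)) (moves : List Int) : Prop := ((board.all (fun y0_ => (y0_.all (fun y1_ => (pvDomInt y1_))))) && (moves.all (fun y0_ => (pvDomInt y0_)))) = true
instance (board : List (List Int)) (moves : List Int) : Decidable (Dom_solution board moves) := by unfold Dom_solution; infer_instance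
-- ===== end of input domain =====

-- B (alternative): instead of transposing, reversing and popping mutable column stacks, it builds
-- the columns once (top first, empty cells kept) and advances a per-column cursor past empty
-- cells; neither Python mutates its arguments (A rebinds board to fresh lists; B only reads it).

-- ===== PORT A =====
-- zip(*board): list of columns, truncated to the shortest row (as Python's zip does)
def pvZipT (board : List (List Int)) : List (List Int) :=
  match board with
  | [] => []
  | [r] => r.map (fun x => [x])
  | r :: s :: rest => List.zipWith (fun x col => x :: col) r (pvZipT (s :: rest))

-- one iteration of A's move loop; the state is (board-as-column-stacks, stack, ans).
-- Python's stack appends/pops at the END; it is modeled here with the top at the HEAD.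
def pvStepA (st : List (List Int) × List Int × Int) (move : Int) :
    List (List Int) × List Int × Int :=
  let mv := move - 1
  match PySem.List.pyGet? st.1 mv with
  | none => st   -- Python raises IndexError here; excluded by Pre_
  | some col =>
    match col.getLast? with
    | none => st   -- 'if board[move]:' is false
    | some doll =>
      match st.2.1 with
      | [] => (PySem.List.pySetD st.1 mv col.dropLast, [doll], st.2.2)
      | t :: rest =>
        if t = doll then (PySem.List.pySetD st.1 mv col.dropLast, rest, st.2.2 + 2)
        else (PySem.List.pySetD st.1 mv col.dropLast, doll :: t :: rest, st.2.2)

def solution (board : List (List Int)) (moves : List Int) : Int :=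
  let cols0 := (pvZipT board).map (fun line => line.reverse)
  -- the zero-stripping loop pops once from the end per zero in the line
  let cols := cols0.map (fun line => line.take (line.length - line.count 0))
  (moves.foldl pvStepA (cols, [], 0)).2.2

-- ===== PORT B =====
-- width = min(map(len, board), default=0)
def pvWidth (board : List (List Int)) : Nat :=
  match board.map List.length with
  | [] => 0
  | x :: xs => xs.foldl min x

-- while p < height and col[p] == 0: p += 1
def pvSkip (col : List Int) (height : Nat) (p : Nat) : Nat :=
  if p < height ∧ col.getD p 0 = 0 then pvSkip col height (p + 1) else p
termination_by height - p
decreasing_by omega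

-- one iteration of B's move loop; state is (ptr, basket, ans); basket top at the HEAD.
def pvStepB (cols : List (List Int)) (height : Nat)
    (st : List Nat × List Int × Int) (m : Int) : List Nat × List Int × Int :=
  let j := m - 1
  let p := PySem.List.pyGetD st.1 j 0
  let col := PySem.List.pyGetD cols j []
  let q := pvSkip col height p
  if q < height then
    let doll := col.getD q 0
    match st.2.1 with
    | [] => (PySem.List.pySetD st.1 j (q + 1), [doll], st.2.2)
    | t :: rest =>
      if t = doll then (PySem.List.pySetD st.1 j (q + 1), rest, st.2.2 + 2)
      else (PySem.List.pySetD st.1 j (q + 1), doll :: t :: rest, st.2.2)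
  else (PySem.List.pySetD st.1 j q, st.2)

def solution_alt (board : List (List Int)) (moves : List Int) : Int :=
  let width := pvWidth board
  let cols := (List.range width).map (fun (j : Nat) => board.map (fun row => PySem.List.pyGetD row ((j : Nat) : Int) 0))
  let height := board.length
  (moves.foldl (pvStepB cols height) (List.replicate width 0, [], 0)).2.2

-- ===== PRECONDITION & SPEC =====
-- Pre_ restricts to the game's natural domain: every move number addresses an existing column
-- (A raises IndexError otherwise; Python's negative-index wraparound is admitted and reproduced),
-- and no column a move lands on has an empty cell (0) below a doll — on such non-game boards A's
-- strip-count-from-the-bottom and B's skip-empty-cells readings are both accidental and no one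
-- would specify either.
def Pre_solution (board : List (List Int)) (moves : List Int) : Prop :=
  ∀ m ∈ moves,
    1 - ((board.map List.length).min?.getD 0 : Int) ≤ m ∧
    m ≤ ((board.map List.length).min?.getD 0 : Int) ∧
    (board.map (fun r =>
      r.getD ((m - 1) % ((board.map List.length).min?.getD 0 : Int)).toNat 0)).Pairwise
      (fun a b => b = 0 → a = 0)

instance (board : List (List Int)) (moves : List Int) : Decidable (Pre_solution board moves) := by
  unfold Pre_solution; infer_instance

def pvWitness_solution : List (List Int) × List Int := ([[0, 3], [2, 3]], [1, 2, 2])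

def Spec_solution (board : List (List Int)) (moves : List Int) (out : Int) : Prop := out = solution_alt board moves
instance (board : List (List Int)) (moves : List Int) (out : Int) : Decidable (Spec_solution board moves out) := by unfold Spec_solution; infer_instance

-- ===== CLAIM (what is proved, stated in full; the proofs are below) =====
def Claim_equal_solution : Prop := ∀ (board : List (List Int)) (moves : List Int), Dom_solution board moves → Pre_solution board moves → Spec_solution board moves (solution board moves)

-- ===== LEMMAS AND PROOFS =====

-- number of full columns = length of the shortest row (what zip(*board) keeps); 0 for an empty board
def pvNcols : List (List Int) → Nat
  | [] => 0
  | [r] => r.length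
  | r :: s :: rest => min r.length (pvNcols (s :: rest))

-- column j of a grid, top first (only used at j below every row's length)
def pvColTF (g : List (List Int)) (j : Nat) : List Int := g.map (fun r => r.getD j 0)

-- A's cleaned column stack for column j, bottom first
def pvStk (g : List (List Int)) (j : Nat) : List Int :=
  ((pvColTF g j).filter (fun x => x != 0)).reverse


-- A's column stack for column j when the per-column cursor stands at p, bottom first
def pvStkP (g : List (List Int)) (j p : Nat) : List Int :=
  (((pvColTF g j).drop p).filter (fun x => x != 0)).reverse

lemma pv_stkP_zero (g : List (List Int)) (j : Nat) : pvStkP g j 0 = pvStk g j := by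
  simp [pvStkP, pvStk]

lemma pv_zipT_eq (board : List (List Int)) :
    pvZipT board = (List.range (pvNcols board)).map (fun j => pvColTF board j) := by
  induction board using pvZipT.induct with
  | case1 => simp [pvZipT, pvNcols]
  | case2 r =>
    apply List.ext_getElem
    · simp [pvZipT, pvNcols]
    · intro i h1 h2
      simp only [pvZipT, List.length_map] at h1
      simp only [pvZipT, pvNcols, List.getElem_map, List.getElem_range, pvColTF, List.map_cons,
        List.map_nil]
      rw [List.getD_eq_getElem r 0 h1]
  | case3 r s rest ih =>
    apply List.ext_getElem
    · simp [pvZipT, pvNcols, ih]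
    · intro i h1 h2
      simp only [pvZipT, ih] at h1 ⊢
      simp only [List.length_zipWith, List.length_map, List.length_range] at h1
      rw [List.getElem_zipWith]
      simp only [List.getElem_map, List.getElem_range, pvColTF, List.map_cons, pvNcols]
      rw [List.getD_eq_getElem r 0 (by omega)]

lemma pv_zeroTop_decomp (l : List Int) (h : l.Pairwise (fun a b => b = 0 → a = 0)) :
    ∃ k nz, l = List.replicate k 0 ++ nz ∧ 0 ∉ nz := by
  induction l with
  | nil => exact ⟨0, [], rfl, by simp⟩
  | cons x t ih =>
    rcases List.pairwise_cons.mp h with ⟨hx, ht⟩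
    by_cases hx0 : x = 0
    · obtain ⟨k, nz, hl, hnz⟩ := ih ht
      exact ⟨k + 1, nz, by simp [List.replicate_succ, hl, hx0], hnz⟩
    · refine ⟨0, x :: t, by simp, ?_⟩
      intro hmem
      rcases List.mem_cons.mp hmem with h0 | h0
      · exact hx0 h0.symm
      · exact hx0 (hx 0 h0 rfl)

lemma pv_clean_eq (l : List Int) (h : l.Pairwise (fun a b => b = 0 → a = 0)) :
    l.reverse.take (l.reverse.length - l.reverse.count 0) = (l.filter (fun x => x != 0)).reverse := by
  obtain ⟨k, nz, hl, hnz⟩ := pv_zeroTop_decomp l h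
  subst hl
  have hc : nz.count 0 = 0 := List.count_eq_zero.mpr hnz
  have hf : nz.filter (fun x => x != 0) = nz := by
    apply List.filter_eq_self.mpr
    intro a ha
    have : a ≠ 0 := fun h0 => hnz (by rw [h0] at ha; exact ha)
    simpa using this
  rw [List.reverse_append, List.reverse_replicate]
  have hlen : (nz.reverse ++ List.replicate k (0 : Int)).length = nz.length + k := by simp
  have hcnt : (nz.reverse ++ List.replicate k (0 : Int)).count 0 = k := by
    simp [List.count_append, List.count_reverse, hc]
  rw [hlen, hcnt]
  have : nz.length + k - k = nz.reverse.length := by simp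
  rw [this, List.take_left]
  simp [List.filter_append, hf]

lemma pv_foldl_min_cons (xs : List Nat) : ∀ (a b : Nat),
    xs.foldl min (min a b) = min a (xs.foldl min b) := by
  induction xs with
  | nil => intro a b; rfl
  | cons x t ih =>
    intro a b
    simp only [List.foldl_cons]
    rw [min_assoc, ih]

lemma pv_width_eq (board : List (List Int)) : pvWidth board = pvNcols board := by
  induction board using pvNcols.induct with
  | case1 => rfl
  | case2 r => rfl
  | case3 r s rest ih =>
    simp only [pvWidth, pvNcols, List.map_cons, List.foldl_cons] at ih ⊢
    rw [pv_foldl_min_cons, ih]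

lemma pv_minD_eq (board : List (List Int)) :
    ((board.map List.length).min?.getD 0) = pvNcols board := by
  rw [← pv_width_eq]
  cases board with
  | nil => rfl
  | cons r rest =>
    simp only [pvWidth, List.map_cons, List.min?_cons', Option.getD_some]

lemma pv_wrap_toNat (L mv : Int) (_h0 : 0 < L) (h1 : -L ≤ mv) (h2 : mv < L) :
    (0 ≤ mv ∧ (mv % L).toNat = mv.toNat) ∨
    (mv < 0 ∧ (mv % L).toNat = (mv + L).toNat) := by
  by_cases hn : 0 ≤ mv
  · left
    refine ⟨hn, ?_⟩
    rw [Int.emod_eq_of_lt hn h2]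
  · right
    refine ⟨by omega, ?_⟩
    have he : mv % L = (mv + L * 1) % L := by rw [Int.add_mul_emod_self_left]
    rw [he]
    rw [Int.emod_eq_of_lt (by omega) (by omega)]
    omega

lemma pv_pyGet_wrap {α : Type} (xs : List α) (mv : Int)
    (h1 : -(xs.length : Int) ≤ mv) (h2 : mv < (xs.length : Int)) :
    PySem.List.pyGet? xs mv = xs[(mv % (xs.length : Int)).toNat]? := by
  have h0 : (0 : Int) < xs.length := by omega
  rcases pv_wrap_toNat (xs.length : Int) mv h0 h1 h2 with ⟨hn, he⟩ | ⟨hn, he⟩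
  · rw [he, show mv = (mv.toNat : Int) by omega, PySem.List.pyGet?_natCast,
      Int.toNat_natCast]
  · have hk : mv = -(((-mv).toNat : Nat) : Int) := by omega
    rw [he, hk, PySem.List.pyGet?_neg_natCast xs ((-mv).toNat) (by omega) (by omega)]
    congr 1
    omega

lemma pv_pyGetD_wrap {α : Type} [Inhabited α] (xs : List α) (mv : Int) (d : α)
    (h1 : -(xs.length : Int) ≤ mv) (h2 : mv < (xs.length : Int)) :
    PySem.List.pyGetD xs mv d = xs.getD (mv % (xs.length : Int)).toNat d := by
  have h0 : (0 : Int) < xs.length := by omega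
  rcases pv_wrap_toNat (xs.length : Int) mv h0 h1 h2 with ⟨hn, he⟩ | ⟨hn, he⟩
  · rw [he, show mv = (mv.toNat : Int) by omega, PySem.List.pyGetD_natCast,
      Int.toNat_natCast]
  · have hk : mv = -(((-mv).toNat : Nat) : Int) := by omega
    rw [he, hk, PySem.List.pyGetD_neg_natCast xs ((-mv).toNat) d (by omega) (by omega)]
    rw [List.getD_eq_getElem _ _ (by omega)]
    congr 1
    omega

lemma pv_pySetD_wrap {α : Type} (xs : List α) (mv : Int) (v : α)
    (h1 : -(xs.length : Int) ≤ mv) (h2 : mv < (xs.length : Int)) :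
    PySem.List.pySetD xs mv v = xs.set (mv % (xs.length : Int)).toNat v := by
  have h0 : (0 : Int) < xs.length := by omega
  rcases pv_wrap_toNat (xs.length : Int) mv h0 h1 h2 with ⟨hn, he⟩ | ⟨hn, he⟩
  · rw [he]
    simp only [PySem.List.pySetD, PySem.List.pySet?, PySem.List.pyIdx?, if_pos hn, if_pos h2,
      Option.map_some, Option.getD_some]
  · rw [he]
    simp only [PySem.List.pySetD, PySem.List.pySet?, PySem.List.pyIdx?,
      if_neg (by omega : ¬ (0 : Int) ≤ mv), if_pos h1, Option.map_some, Option.getD_some]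
    congr 1
    omega

-- resolved (wrapped) column index of move m, and B's static column table
def pvJn (board : List (List Int)) (m : Int) : Nat :=
  ((m - 1) % ((pvNcols board : Nat) : Int)).toNat

def pvColsS (board : List (List Int)) : List (List Int) :=
  (List.range (pvNcols board)).map (fun j => pvColTF board j)

lemma pv_cols_static (board : List (List Int)) :
    (List.range (pvNcols board)).map
      (fun (j : Nat) => board.map (fun row => PySem.List.pyGetD row ((j : Nat) : Int) 0)) = pvColsS board := by
  apply List.map_congr_left
  intro j _
  simp only [pvColTF, PySem.List.pyGetD_natCast]

lemma pv_skip_spec (col : List Int) (height p : Nat) (hh : height = col.length) :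
    p ≤ pvSkip col height p ∧
    (pvSkip col height p < height → col.getD (pvSkip col height p) 0 ≠ 0) ∧
    (col.drop p).filter (fun x => x != 0) =
      (col.drop (pvSkip col height p)).filter (fun x => x != 0) := by
  induction p using pvSkip.induct (col := col) (height := height) with
  | case1 p hcond ih =>
    rw [pvSkip, if_pos hcond]
    obtain ⟨ih1, ih2, ih3⟩ := ih
    refine ⟨by omega, ih2, ?_⟩
    rw [← ih3]
    have hp : p < col.length := by omega
    rw [List.drop_eq_getElem_cons hp, List.filter_cons]
    have h0 : col[p] = 0 := by
      have := hcond.2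
      rwa [List.getD_eq_getElem _ _ hp] at this
    simp [h0]
  | case2 p hcond =>
    rw [pvSkip, if_neg hcond]
    refine ⟨le_refl p, ?_, rfl⟩
    intro hlt
    by_contra h0
    exact hcond ⟨hlt, h0⟩

lemma pv_step_eq (board colsA : List (List Int)) (ptrL : List Nat)
    (stack : List Int) (ans : Int) (m : Int)
    (hW : colsA.length = pvNcols board) (hP : ptrL.length = pvNcols board)
    (hm1 : 1 - ((pvNcols board : Nat) : Int) ≤ m) (hm2 : m ≤ ((pvNcols board : Nat) : Int))
    (hcol : colsA[pvJn board m]? =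
      some (pvStkP board (pvJn board m) (ptrL.getD (pvJn board m) 0))) :
    (pvStepA (colsA, stack, ans) m).2 =
      (pvStepB (pvColsS board) board.length (ptrL, stack, ans) m).2 ∧
    (pvStepA (colsA, stack, ans) m).1.length = pvNcols board ∧
    (pvStepB (pvColsS board) board.length (ptrL, stack, ans) m).1.length = pvNcols board ∧
    (∀ j : Nat, colsA[j]? = some (pvStkP board j (ptrL.getD j 0)) →
      (pvStepA (colsA, stack, ans) m).1[j]? =
        some (pvStkP board j
          ((pvStepB (pvColsS board) board.length (ptrL, stack, ans) m).1.getD j 0))) := by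
  have hW0 : 0 < pvNcols board := by omega
  have hmv1 : -((pvNcols board : Nat) : Int) ≤ m - 1 := by omega
  have hmv2 : m - 1 < ((pvNcols board : Nat) : Int) := by omega
  have hjn : pvJn board m < pvNcols board := by
    have h1 := Int.emod_nonneg (m - 1) (by exact_mod_cast hW0.ne' : ((pvNcols board : Nat) : Int) ≠ 0)
    have h2 := Int.emod_lt_of_pos (m - 1) (by exact_mod_cast hW0 : (0 : Int) < ((pvNcols board : Nat) : Int))
    simp only [pvJn]
    omega
  set jn := pvJn board m with hjndef
  -- resolve the wrapped accesses
  have hgA : PySem.List.pyGet? colsA (m - 1) = colsA[jn]? := by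
    have h := pv_pyGet_wrap colsA (m - 1) (by rw [hW]; exact hmv1) (by rw [hW]; exact hmv2)
    rw [hW] at h
    exact h
  have hgP : PySem.List.pyGetD ptrL (m - 1) 0 = ptrL.getD jn 0 := by
    have h := pv_pyGetD_wrap ptrL (m - 1) 0 (by rw [hP]; exact hmv1) (by rw [hP]; exact hmv2)
    rw [hP] at h
    exact h
  have hlenS : (pvColsS board).length = pvNcols board := by simp [pvColsS]
  have hgC : PySem.List.pyGetD (pvColsS board) (m - 1) [] = pvColTF board jn := by
    have h := pv_pyGetD_wrap (pvColsS board) (m - 1) [] (by rw [hlenS]; exact hmv1)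
      (by rw [hlenS]; exact hmv2)
    rw [hlenS] at h
    rw [h, List.getD_eq_getElem _ _ (by simpa [pvColsS] using hjn)]
    simp only [pvColsS, List.getElem_map, List.getElem_range]
    rfl
  have hsetA : ∀ v, PySem.List.pySetD colsA (m - 1) v = colsA.set jn v := by
    intro v
    have h := pv_pySetD_wrap colsA (m - 1) v (by rw [hW]; exact hmv1) (by rw [hW]; exact hmv2)
    rw [hW] at h
    exact h
  have hsetP : ∀ v, PySem.List.pySetD ptrL (m - 1) v = ptrL.set jn v := by
    intro v
    have h := pv_pySetD_wrap ptrL (m - 1) v (by rw [hP]; exact hmv1) (by rw [hP]; exact hmv2)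
    rw [hP] at h
    exact h
  set p := ptrL.getD jn 0 with hpdef
  set col := pvColTF board jn with hcoldef
  have hcl : board.length = col.length := by simp [hcoldef, pvColTF]
  set q := pvSkip col board.length p with hqdef
  obtain ⟨hq1, hq2, hq3⟩ := pv_skip_spec col board.length p hcl
  rw [← hqdef] at hq1 hq2 hq3
  by_cases hqlt : q < board.length
  · -- a doll is grabbed
    have hdoll : col.getD q 0 ≠ 0 := hq2 hqlt
    have hqcol : q < col.length := by omega
    have hdrop : col.drop q = col.getD q 0 :: col.drop (q + 1) := by
      rw [List.getD_eq_getElem _ _ hqcol]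
      exact List.drop_eq_getElem_cons hqcol
    have hfilter : (col.drop q).filter (fun x => x != 0) =
        col.getD q 0 :: (col.drop (q + 1)).filter (fun x => x != 0) := by
      rw [hdrop, List.filter_cons]
      have hd' : ¬ col[q]?.getD 0 = 0 := by
        rw [← List.getD_eq_getElem?_getD]; exact hdoll
      simp [hd']
    have hstk : pvStkP board jn p =
        ((col.drop (q + 1)).filter (fun x => x != 0)).reverse ++ [col.getD q 0] := by
      rw [pvStkP, ← hcoldef, hq3, hfilter, List.reverse_cons]
    have hstk1 : pvStkP board jn (q + 1) =
        ((col.drop (q + 1)).filter (fun x => x != 0)).reverse := by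
      rw [pvStkP, ← hcoldef]
    have hA1 : (pvStepA (colsA, stack, ans) m).1 =
        colsA.set jn (pvStkP board jn (q + 1)) := by
      rcases stack with _ | ⟨t, rest⟩
      · simp only [pvStepA, hgA, hcol, hstk, hstk1, List.getLast?_concat,
          List.dropLast_concat, hsetA]
      · by_cases htd : t = col.getD q 0
        · simp only [pvStepA, hgA, hcol, hstk, hstk1, List.getLast?_concat,
            List.dropLast_concat, hsetA, htd, if_pos]
        · simp only [pvStepA, hgA, hcol, hstk, hstk1, List.getLast?_concat,
            List.dropLast_concat, hsetA, if_neg htd]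
    have hB1 : (pvStepB (pvColsS board) board.length (ptrL, stack, ans) m).1 =
        ptrL.set jn (q + 1) := by
      rcases stack with _ | ⟨t, rest⟩
      · simp only [pvStepB, hgP, hgC, ← hqdef, if_pos hqlt, hsetP]
      · by_cases htd : t = col.getD q 0
        · simp only [pvStepB, hgP, hgC, ← hqdef, if_pos hqlt, hsetP, htd, if_pos]
        · simp only [pvStepB, hgP, hgC, ← hqdef, if_pos hqlt, hsetP, if_neg htd]
    refine ⟨?_, ?_, ?_, ?_⟩
    · rcases stack with _ | ⟨t, rest⟩
      · simp only [pvStepA, pvStepB, hgA, hcol, hgP, hgC, ← hqdef, if_pos hqlt, hstk,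
          List.getLast?_concat, List.dropLast_concat, hsetA, hsetP]
      · by_cases htd : t = col.getD q 0
        · simp only [pvStepA, pvStepB, hgA, hcol, hgP, hgC, ← hqdef, if_pos hqlt, hstk,
            List.getLast?_concat, List.dropLast_concat, hsetA, hsetP, htd, if_pos]
        · simp only [pvStepA, pvStepB, hgA, hcol, hgP, hgC, ← hqdef, if_pos hqlt, hstk,
            List.getLast?_concat, List.dropLast_concat, hsetA, hsetP, if_neg htd]
    · rw [hA1, List.length_set, hW]
    · rw [hB1, List.length_set, hP]
    · intro j hj
      rw [hA1, hB1]
      by_cases hij : j = jn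
      · subst hij
        rw [List.getElem?_set_self (by omega : jn < colsA.length)]
        have hq' : (ptrL.set jn (q + 1)).getD jn 0 = q + 1 := by
          rw [List.getD_eq_getElem _ _ (by rw [List.length_set]; omega :
            jn < (ptrL.set jn (q + 1)).length)]
          exact List.getElem_set_self (by rw [List.length_set]; omega)
        rw [hq']
      · have hne : (ptrL.set jn (q + 1)).getD j 0 = ptrL.getD j 0 := by
          rw [List.getD_eq_getElem?_getD, List.getD_eq_getElem?_getD,
            List.getElem?_set_ne (fun e => hij e.symm)]
        rw [List.getElem?_set_ne (fun e => hij e.symm), hj, hne]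
  · -- the column is exhausted: nothing is grabbed
    have hstk : pvStkP board jn p = [] := by
      rw [pvStkP, ← hcoldef, hq3, List.drop_eq_nil_of_le (by omega)]
      rfl
    have hA0 : pvStepA (colsA, stack, ans) m = (colsA, stack, ans) := by
      simp only [pvStepA, hgA, hcol, hstk, List.getLast?_nil]
    have hB1 : (pvStepB (pvColsS board) board.length (ptrL, stack, ans) m) =
        (ptrL.set jn q, stack, ans) := by
      simp only [pvStepB, hgP, hgC, ← hqdef, if_neg hqlt, hsetP]
    refine ⟨by rw [hA0, hB1], by rw [hA0]; exact hW, by rw [hB1, List.length_set]; exact hP, ?_⟩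
    intro j hj
    rw [hA0, hB1]
    by_cases hij : j = jn
    · subst hij
      rw [hj]
      have hq' : (ptrL.set jn q).getD jn 0 = q := by
        rw [List.getD_eq_getElem _ _ (by rw [List.length_set]; omega :
          jn < (ptrL.set jn q).length)]
        exact List.getElem_set_self (by rw [List.length_set]; omega)
      rw [hq', ← hpdef]
      rw [pvStkP, pvStkP, ← hcoldef, hq3]
    · have hne : (ptrL.set jn q).getD j 0 = ptrL.getD j 0 := by
        rw [List.getD_eq_getElem?_getD, List.getD_eq_getElem?_getD,
          List.getElem?_set_ne (fun e => hij e.symm)]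
      rw [hj, hne]

lemma pv_fold_eq (board : List (List Int)) (moves : List Int) :
    ∀ (colsA : List (List Int)) (ptrL : List Nat) (stack : List Int) (ans : Int),
      colsA.length = pvNcols board → ptrL.length = pvNcols board →
      (∀ m ∈ moves, 1 - ((pvNcols board : Nat) : Int) ≤ m ∧ m ≤ ((pvNcols board : Nat) : Int)) →
      (∀ m ∈ moves, colsA[pvJn board m]? =
        some (pvStkP board (pvJn board m) (ptrL.getD (pvJn board m) 0))) →
      (moves.foldl pvStepA (colsA, stack, ans)).2 =
        (moves.foldl (pvStepB (pvColsS board) board.length) (ptrL, stack, ans)).2 := by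
  induction moves with
  | nil => intro colsA ptrL stack ans _ _ _ _; rfl
  | cons m ms ih =>
    intro colsA ptrL stack ans hW hP hb hinv
    obtain ⟨hm1, hm2⟩ := hb m (by simp)
    obtain ⟨hs2, hlA, hlB, hscols⟩ :=
      pv_step_eq board colsA ptrL stack ans m hW hP hm1 hm2 (hinv m (by simp))
    simp only [List.foldl_cons]
    have hrest := ih (pvStepA (colsA, stack, ans) m).1
      (pvStepB (pvColsS board) board.length (ptrL, stack, ans) m).1
      (pvStepB (pvColsS board) board.length (ptrL, stack, ans) m).2.1
      (pvStepB (pvColsS board) board.length (ptrL, stack, ans) m).2.2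
      hlA hlB
      (fun m' hm' => hb m' (List.mem_cons_of_mem _ hm'))
      (fun m' hm' => hscols (pvJn board m') (hinv m' (List.mem_cons_of_mem _ hm')))
    have hrwA : pvStepA (colsA, stack, ans) m =
        ((pvStepA (colsA, stack, ans) m).1,
         (pvStepB (pvColsS board) board.length (ptrL, stack, ans) m).2.1,
         (pvStepB (pvColsS board) board.length (ptrL, stack, ans) m).2.2) := by
      rw [← hs2]
    have hrwB : pvStepB (pvColsS board) board.length (ptrL, stack, ans) m =
        ((pvStepB (pvColsS board) board.length (ptrL, stack, ans) m).1,
         (pvStepB (pvColsS board) board.length (ptrL, stack, ans) m).2.1,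
         (pvStepB (pvColsS board) board.length (ptrL, stack, ans) m).2.2) := rfl
    rw [hrwA, hrwB]
    exact hrest

lemma pv_init (board : List (List Int)) (jn : Nat) (hjN : jn < pvNcols board)
    (h4 : (board.map (fun r => r.getD jn 0)).Pairwise (fun a b => b = 0 → a = 0)) :
    (((pvZipT board).map (fun line => line.reverse)).map
      (fun line => line.take (line.length - line.count 0)))[jn]? =
      some (pvStk board jn) := by
  rw [pv_zipT_eq, List.map_map, List.map_map, List.getElem?_map,
    List.getElem?_range hjN]
  simp only [Option.map_some, Function.comp]
  rw [pv_clean_eq (pvColTF board jn) h4, pvStk]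

-- ===== VERDICT (by name: the statement is the Claim_ definition above) =====
theorem solution_spec : Claim_equal_solution := by
  unfold Claim_equal_solution
  intro board moves _ hpre
  unfold Spec_solution solution solution_alt
  simp only [pv_width_eq, pv_cols_static]
  have hmin : (((board.map List.length).min?.getD 0 : Nat) : Int) = ((pvNcols board : Nat) : Int) := by
    rw [pv_minD_eq]
  have hzl : (((pvZipT board).map (fun line => line.reverse)).map
      (fun line => line.take (line.length - line.count 0))).length = pvNcols board := by
    rw [pv_zipT_eq]
    simp
  have hfold := pv_fold_eq board moves
    (((pvZipT board).map (fun line => line.reverse)).map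
      (fun line => line.take (line.length - line.count 0)))
    (List.replicate (pvNcols board) 0) [] 0 hzl (by simp) ?_ ?_
  · exact congrArg Prod.snd hfold
  · intro m hm
    obtain ⟨h1, h2, _⟩ := hpre m hm
    rw [hmin] at h1 h2
    exact ⟨h1, h2⟩
  · intro m hm
    obtain ⟨h1, h2, h4⟩ := hpre m hm
    rw [hmin] at h1 h2
    have hjN : pvJn board m < pvNcols board := by
      have hW0 : 0 < pvNcols board := by omega
      have ha := Int.emod_nonneg (m - 1)
        (by exact_mod_cast hW0.ne' : ((pvNcols board : Nat) : Int) ≠ 0)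
      have hb := Int.emod_lt_of_pos (m - 1)
        (by exact_mod_cast hW0 : (0 : Int) < ((pvNcols board : Nat) : Int))
      simp only [pvJn]
      omega
    have h4' : (board.map (fun r => r.getD (pvJn board m) 0)).Pairwise
        (fun a b => b = 0 → a = 0) := by
      have : ((m - 1) % ((board.map List.length).min?.getD 0 : Int)).toNat = pvJn board m := by
        simp only [pvJn]
        rw [hmin]
      rwa [this] at h4
    have hrep : (List.replicate (pvNcols board) (0 : Nat)).getD (pvJn board m) 0 = 0 := by
      rw [List.getD_eq_getElem?_getD, List.getElem?_replicate]
      split_ifs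
      all_goals rfl
    rw [hrep, pv_stkP_zero]
    exact pv_init board (pvJn board m) hjN h4'
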